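-- pv_equiv track=rewrite | github.com/DimCrimson/dimcrimson.github.io | lab/Azure/AzureOAuthExposureScanner/oauth_scanner.py | compute_base_severity
-- ===== SOURCE A (Python) =====
-- LOW_SCOPES = {
--     "User.Read",
--     "openid",
--     "profile",
--     "email"
-- }
--
-- MEDIUM_SCOPES = {
--     "Mail.Read",
--     "Files.Read",
--     "offline_access",
--     "User.Read.All"
-- }
--
-- def classify_scope(scope: str) -> str:
--     if scope in LOW_SCOPES:
--         return "LOW"
--     if scope in MEDIUM_SCOPES:
--         return "MEDIUM"
--     return "HIGH"
--
-- def compute_base_severity(oauth_grants):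
--     levels = []
--
--     for g in oauth_grants:
--         for s in g.get("scopes", []):
--             levels.append(classify_scope(s))
--
--     if "HIGH" in levels:
--         return "HIGH"
--     if "MEDIUM" in levels:
--         return "MEDIUM"
--     return "LOW"
-- ===== SOURCE B (Python) =====
-- LOW_SCOPES = {
--     "User.Read",
--     "openid",
--     "profile",
--     "email"
-- }
--
-- MEDIUM_SCOPES = {
--     "Mail.Read",
--     "Files.Read",
--     "offline_access",
--     "User.Read.All"
-- }
--
-- def compute_base_severity(oauth_grants):
--     # single fold: keep only the running maximum, return early on a HIGH scope
--     best = 0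
--     for g in oauth_grants:
--         for s in g.get("scopes", []):
--             if s in LOW_SCOPES:
--                 continue
--             if s in MEDIUM_SCOPES:
--                 best = 1
--             else:
--                 return "HIGH"
--     return "MEDIUM" if best else "LOW"
-- ===== Notes on version B (the rewrite author's own statement) =====
-- stated objective: simpler
-- what changed: Replaces building the full list of per-scope levels and scanning it twice with a single fold that keeps only the running maximum and returns HIGH immediately on the first high scope.
import Mathlib
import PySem

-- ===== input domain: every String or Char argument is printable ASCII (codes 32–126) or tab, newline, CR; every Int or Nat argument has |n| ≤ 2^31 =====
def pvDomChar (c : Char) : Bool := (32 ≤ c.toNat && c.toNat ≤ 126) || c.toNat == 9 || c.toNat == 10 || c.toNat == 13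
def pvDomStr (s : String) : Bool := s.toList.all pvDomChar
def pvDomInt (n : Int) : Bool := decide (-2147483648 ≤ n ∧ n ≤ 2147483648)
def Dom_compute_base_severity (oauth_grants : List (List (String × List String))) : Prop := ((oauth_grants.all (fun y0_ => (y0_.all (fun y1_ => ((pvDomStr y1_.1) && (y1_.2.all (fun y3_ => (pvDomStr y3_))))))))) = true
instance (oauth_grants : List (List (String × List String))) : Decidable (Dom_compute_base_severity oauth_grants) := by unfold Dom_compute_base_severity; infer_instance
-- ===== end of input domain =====

-- B replaces the build-levels-list-then-scan-twice of A by a single fold keeping only the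
-- running maximum, returning "HIGH" early (objective: simpler).

-- ===== PORT A =====
def LOW_SCOPES : PySem.Set String :=
  PySem.Set.ofList ["User.Read", "openid", "profile", "email"]

def MEDIUM_SCOPES : PySem.Set String :=
  PySem.Set.ofList ["Mail.Read", "Files.Read", "offline_access", "User.Read.All"]

def classify_scope (scope : String) : String :=
  if PySem.Set.contains LOW_SCOPES scope then "LOW"
  else if PySem.Set.contains MEDIUM_SCOPES scope then "MEDIUM"
  else "HIGH"

def compute_base_severity (oauth_grants : List (List (String × List String))) : String :=
  let levels := oauth_grants.foldl
    (fun acc g =>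
      (PySem.Dict.getD (PySem.Dict.mk g) "scopes" []).foldl (fun acc2 s => acc2 ++ [classify_scope s]) acc)
    []
  if levels.contains "HIGH" then "HIGH"
  else if levels.contains "MEDIUM" then "MEDIUM"
  else "LOW"

-- ===== PORT B =====
-- inner loop of Source B over one grant's scopes: none = early 'return "HIGH"'
def altScopes : List String → Nat → Option Nat
  | [], best => some best
  | s :: rest, best =>
    if PySem.Set.contains LOW_SCOPES s then altScopes rest best
    else if PySem.Set.contains MEDIUM_SCOPES s then altScopes rest 1
    else none

-- outer loop of Source B over the grants
def altGrants : List (List (String × List String)) → Nat → Option Nat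
  | [], best => some best
  | g :: rest, best =>
    match altScopes (PySem.Dict.getD (PySem.Dict.mk g) "scopes" []) best with
    | none => none
    | some b => altGrants rest b

def compute_base_severity_alt (oauth_grants : List (List (String × List String))) : String :=
  match altGrants oauth_grants 0 with
  | none => "HIGH"
  | some best => if best ≠ 0 then "MEDIUM" else "LOW"

-- ===== PRECONDITION & SPEC =====
def Spec_compute_base_severity (oauth_grants : List (List (String × List String))) (out : String) : Prop := out = compute_base_severity_alt oauth_grants
instance (oauth_grants : List (List (String × List String))) (out : String) : Decidable (Spec_compute_base_severity oauth_grants out) := by unfold Spec_compute_base_severity; infer_instance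

-- ===== CLAIM (what is proved, stated in full; the proofs are below) =====
def Claim_equal_compute_base_severity : Prop := ∀ (oauth_grants : List (List (String × List String))), Dom_compute_base_severity oauth_grants → Spec_compute_base_severity oauth_grants (compute_base_severity oauth_grants)

-- ===== LEMMAS AND PROOFS =====

-- the flat list of levels A builds
def levelsOf (oauth_grants : List (List (String × List String))) : List String :=
  oauth_grants.flatMap
    (fun g => (PySem.Dict.getD (PySem.Dict.mk g) "scopes" []).map classify_scope)

theorem classify_low {s : String} (hl : s ∈ LOW_SCOPES) :
    classify_scope s = "LOW" := by simp [classify_scope, hl]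

theorem classify_medium {s : String} (hl : s ∉ LOW_SCOPES) (hm : s ∈ MEDIUM_SCOPES) :
    classify_scope s = "MEDIUM" := by simp [classify_scope, hl, hm]

theorem classify_high {s : String} (hl : s ∉ LOW_SCOPES) (hm : s ∉ MEDIUM_SCOPES) :
    classify_scope s = "HIGH" := by simp [classify_scope, hl, hm]

theorem foldl_classify_append (scopes : List String) (acc : List String) :
    scopes.foldl (fun a s => a ++ [classify_scope s]) acc = acc ++ scopes.map classify_scope := by
  induction scopes generalizing acc with
  | nil => simp
  | cons s rest ih => simp [ih]

theorem foldl_levels (oauth_grants : List (List (String × List String))) (acc : List String) :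
    oauth_grants.foldl
      (fun acc g =>
        (PySem.Dict.getD (PySem.Dict.mk g) "scopes" []).foldl
          (fun acc2 s => acc2 ++ [classify_scope s]) acc)
      acc
    = acc ++ levelsOf oauth_grants := by
  induction oauth_grants generalizing acc with
  | nil => simp [levelsOf]
  | cons g rest ih =>
    rw [List.foldl_cons, foldl_classify_append, ih]
    simp [levelsOf]

theorem altScopes_eq (scopes : List String) (best : Nat) :
    altScopes scopes best =
      if "HIGH" ∈ scopes.map classify_scope then none
      else some (if "MEDIUM" ∈ scopes.map classify_scope then 1 else best) := by
  induction scopes generalizing best with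
  | nil => simp [altScopes]
  | cons s rest ih =>
    by_cases hl : s ∈ LOW_SCOPES
    · rw [show altScopes (s :: rest) best = altScopes rest best by simp [altScopes, hl]]
      simp [ih, classify_low hl]
    · by_cases hm : s ∈ MEDIUM_SCOPES
      · rw [show altScopes (s :: rest) best = altScopes rest 1 by
          simp [altScopes, hl, hm]]
        simp [ih, classify_medium hl hm]
      · rw [show altScopes (s :: rest) best = none by simp [altScopes, hl, hm]]
        simp [classify_high hl hm]

theorem altGrants_eq (oauth_grants : List (List (String × List String))) (best : Nat) :
    altGrants oauth_grants best =
      if "HIGH" ∈ levelsOf oauth_grants then none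
      else some (if "MEDIUM" ∈ levelsOf oauth_grants then 1 else best) := by
  induction oauth_grants generalizing best with
  | nil => simp [altGrants, levelsOf]
  | cons g rest ih =>
    rw [show altGrants (g :: rest) best =
        (match altScopes (PySem.Dict.getD (PySem.Dict.mk g) "scopes" []) best with
          | none => none
          | some b => altGrants rest b) from rfl]
    rw [altScopes_eq]
    by_cases hh : "HIGH" ∈ (PySem.Dict.getD (PySem.Dict.mk g) "scopes" []).map classify_scope
    · simp [hh, levelsOf]
    · by_cases hm :
        "MEDIUM" ∈ (PySem.Dict.getD (PySem.Dict.mk g) "scopes" []).map classify_scope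
      · simp [hh, hm, ih, levelsOf]
      · simp [hh, hm, ih, levelsOf]

-- ===== VERDICT (by name: the statement is the Claim_ definition above) =====
theorem compute_base_severity_spec : Claim_equal_compute_base_severity := by
  intro oauth_grants _
  show compute_base_severity oauth_grants = compute_base_severity_alt oauth_grants
  simp only [compute_base_severity, compute_base_severity_alt, foldl_levels,
    List.nil_append, altGrants_eq]
  by_cases hh : "HIGH" ∈ levelsOf oauth_grants
  · simp [hh]
  · by_cases hm : "MEDIUM" ∈ levelsOf oauth_grants
    · simp [hh, hm]
    · simp [hh, hm]
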